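-- pv_equiv track=rewrite | github.com/HSchwarz99/math | coma_aufgaben/challenge_4.py | get_eqclasses
-- ===== SOURCE A (Python) =====
-- class KnotenKlassen(dict):
--   # Klasse die das die Eigeschaften der dict Klasse erbt, aber anders als die
--   # dict Klasse bei einem nicht bekannten key eine leere liste zurueck gibt
--   def __missing__(self, key):
--     return list()
--
-- def get_classes(n, E):
--   # alle reflexiven Elemente auf Vn x Vn
--   idk = []
--   for i in range(n):
--     idk.append((i,i))
--   # mergen von knoten
--   knoten = idk + E
--   # Nachbarschaften von k = {0, ... , n - 1}
--   # erstellen eines neuen Knoten objects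
--   k = KnotenKlassen()
--   for x in knoten:
--     # fuegt zur liste vom key x[0] ein den korespondierenden wert x[1] des
--     # tupples x hinzu
--     k[x[0]] = k[x[0]] + [x[1]]
--   return list(k.values())
--
-- def are_equal(list1, list2):
--   return set(list1) == set(list2)
--
-- def are_disjoint(list1, list2):
--   return set(list1).isdisjoint(list2)
--
-- def get_eqclasses(n, E):
--   l = get_classes(n, E)
--   partitions = list()
--   while len(l) >= 1:
--     # nimmt immer das letzte Element packt es in die partitions liste und
--     # loescht das element aus der Liste
--     partitions.append(l[-1])
--     l.pop(-1)
--     i = len(l)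
--     while i >= 1:
--       # testet alle elemente in der Liste auf gleichheit mit dem letzten El. der
--       # partitions Liste und loescht sie fals sie gleich sind.
--       # wenn die elemente nicht gleich sind, wird geprueft ob die Listen
--       # disjunkt sind um zu testen ob es sich wirklich um eine Aequivalenz-
--       # klassenrelation handelt.
--       # wenn es sich um keine Aequivalenzklassenrelation handelt wird eine
--       # leere Liste returnt
--       # sonst wird die partitions liste returned.
--       i -= 1
--       if are_equal(l[i], partitions[-1]):
--         l.pop(i)
--       elif not (are_disjoint(l[i], partitions[-1])):
--         return []
--   return partitions
-- ===== SOURCE B (Python) =====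
-- def get_eqclasses(n, E):
--     # build node -> neighbour-list (reflexive pairs first, then E), as in the spec
--     adj = {}
--     for i in range(n):
--         adj[i] = adj.get(i, []) + [i]
--     for a, b in E:
--         adj[a] = adj.get(a, []) + [b]
--     # single reversed pass: keep the first list of each distinct neighbour-set,
--     # fail as soon as a new set overlaps an already kept (different) set
--     seen = set()
--     covered = set()
--     parts = []
--     for lst in reversed(list(adj.values())):
--         fs = frozenset(lst)
--         if fs in seen:
--             continue
--         if not fs.isdisjoint(covered):
--             return []
--         seen.add(fs)
--         covered |= fs
--         parts.append(lst)
--     return parts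
-- ===== Notes on version B (the rewrite author's own statement) =====
-- stated objective: faster
-- what changed: A repeatedly pops the last adjacency list and rescans all remaining lists for set-equal/overlapping ones (quadratic in the number of lists, with set() rebuilt on every comparison); B makes one reversed pass keeping a hash set of frozenset class representatives and a set of covered elements, so duplicate detection and the disjointness/validity check are O(1) amortised per element.
import Mathlib
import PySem

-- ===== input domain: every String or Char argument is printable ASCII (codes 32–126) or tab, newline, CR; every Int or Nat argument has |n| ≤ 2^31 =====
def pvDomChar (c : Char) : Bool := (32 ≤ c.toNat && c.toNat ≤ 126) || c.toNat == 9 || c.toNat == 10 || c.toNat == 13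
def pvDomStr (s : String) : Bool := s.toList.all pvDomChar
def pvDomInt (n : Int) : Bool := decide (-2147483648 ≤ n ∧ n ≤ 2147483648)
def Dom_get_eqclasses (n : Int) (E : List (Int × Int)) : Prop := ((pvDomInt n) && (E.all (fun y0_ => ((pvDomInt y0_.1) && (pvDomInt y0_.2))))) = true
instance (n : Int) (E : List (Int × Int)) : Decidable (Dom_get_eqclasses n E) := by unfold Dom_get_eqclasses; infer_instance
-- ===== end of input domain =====

-- B replaces A's quadratic pop-and-rescan partition loop by one reversed pass with a
-- seen-set of frozensets and a covered-element set (objective: faster, asymptotic).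

-- ===== PORT A =====
-- are_equal(list1, list2) = (set(list1) == set(list2))
def areEqual (a b : List Int) : Bool :=
  PySem.Set.equal (PySem.Set.ofList a) (PySem.Set.ofList b)

-- are_disjoint(list1, list2) = set(list1).isdisjoint(list2)
def areDisjoint (a b : List Int) : Bool :=
  PySem.Set.isdisjoint (PySem.Set.ofList a) b

-- get_classes(n, E): reflexive pairs then E, grouped into the KnotenKlassen dict
-- (k[x[0]] = k[x[0]] + [x[1]] with missing keys defaulting to []); returns list(k.values())
def getClassesA (n : Int) (E : List (Int × Int)) : List (List Int) :=
  let knoten := (PySem.List.pyRange 0 n 1).map (fun i => (i, i)) ++ E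
  (knoten.foldl (fun d x => d.insert x.1 (d.getD x.1 [] ++ [x.2]))
    (PySem.Dict.empty : PySem.Dict Int (List Int))).values

-- inner while loop: scan l (indices len-1 .. 0), pop elements set-equal to p,
-- return [] (here: none) on an element neither equal nor disjoint
def innerA (p : List Int) : List (List Int) → Option (List (List Int))
  | [] => some []
  | x :: rest =>
    match innerA p rest with
    | none => none
    | some r =>
      if areEqual x p then some r
      else if areDisjoint x p then some (x :: r) else none

-- needed by outerA's termination: inner never lengthens the list
theorem innerA_length (p : List Int) : ∀ (l r : List (List Int)),
    innerA p l = some r → r.length ≤ l.length := by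
  intro l
  induction l with
  | nil => intro r h; simp [innerA] at h; simp [← h]
  | cons x rest ih =>
    intro r h
    simp only [innerA] at h
    cases h0 : innerA p rest with
    | none => rw [h0] at h; exact absurd h (by simp)
    | some r0 =>
      rw [h0] at h
      have hr0 := ih r0 h0
      by_cases he : areEqual x p = true
      · simp [he] at h; subst h; simp; omega
      · by_cases hd : areDisjoint x p = true
        · simp [he, hd] at h; subst h; simp; omega
        · simp [he, hd] at h

-- outer while loop: partitions.append(l[-1]); l.pop(-1); then the inner scan
def outerA : List (List Int) → Option (List (List Int))
  | [] => some []
  | x :: xs =>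
    let p := (x :: xs).getLast (List.cons_ne_nil x xs)
    match h : innerA p (x :: xs).dropLast with
    | none => none
    | some l' => (outerA l').map (fun ps => p :: ps)
termination_by l => l.length
decreasing_by
  have hle := innerA_length p ((x :: xs).dropLast) l' h
  have hdl : (x :: xs).dropLast.length < (x :: xs).length := by
    simp [List.length_dropLast]
  omega

-- early 'return []' = none collapses to []
def get_eqclasses (n : Int) (E : List (Int × Int)) : List (List Int) :=
  (outerA (getClassesA n E)).getD []

-- ===== PORT B =====
-- Source B's adjacency build: the reflexive loop over range(n), then the loop over E
def buildB (n : Int) (E : List (Int × Int)) : List (List Int) :=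
  let d0 := (PySem.List.pyRange 0 n 1).foldl (fun d i => d.insert i (d.getD i [] ++ [i]))
    (PySem.Dict.empty : PySem.Dict Int (List Int))
  (E.foldl (fun d x => d.insert x.1 (d.getD x.1 [] ++ [x.2])) d0).values

-- the reversed pass of Source B; 'seen' is a Python set of frozensets, used only for
-- membership ('fs in seen' = set equality) and add, so a list of PySem.Sets consed
-- at the front with an equal-test membership is exact (set iteration order unused)
def goB : List (List Int) → List (PySem.Set Int) → PySem.Set Int → List (List Int) → List (List Int)
  | [], _, _, parts => parts
  | x :: xs, seen, covered, parts =>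
    let fs := PySem.Set.ofList x
    if seen.any (fun s => PySem.Set.equal s fs) then goB xs seen covered parts
    else if !(PySem.Set.isdisjoint fs covered) then []
    else goB xs (fs :: seen) (PySem.Set.union covered fs) (parts ++ [x])

def get_eqclasses_alt (n : Int) (E : List (Int × Int)) : List (List Int) :=
  goB (buildB n E).reverse [] [] []

-- ===== PRECONDITION & SPEC =====
def Spec_get_eqclasses (n : Int) (E : List (Int × Int)) (out : List (List Int)) : Prop := out = get_eqclasses_alt n E
instance (n : Int) (E : List (Int × Int)) (out : List (List Int)) : Decidable (Spec_get_eqclasses n E out) := by unfold Spec_get_eqclasses; infer_instance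

-- ===== CLAIM (what is proved, stated in full; the proofs are below) =====
def Claim_equal_get_eqclasses : Prop := ∀ (n : Int) (E : List (Int × Int)), Dom_get_eqclasses n E → Spec_get_eqclasses n E (get_eqclasses n E)

-- ===== LEMMAS AND PROOFS =====

theorem areEqual_iff (a b : List Int) : areEqual a b = true ↔ (∀ z : Int, z ∈ a ↔ z ∈ b) := by
  simp [areEqual, PySem.Set.equal_iff, PySem.Set.mem_ofList]

theorem areDisjoint_iff (a b : List Int) : areDisjoint a b = true ↔ (∀ z : Int, z ∈ a → z ∉ b) := by
  simp [areDisjoint, PySem.Set.isdisjoint_iff, PySem.Set.mem_ofList]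

-- characterization of the inner scan
theorem innerA_eq (p : List Int) (l : List (List Int)) :
    innerA p l =
      if l.all (fun y => areEqual y p || areDisjoint y p)
      then some (l.filter (fun y => !areEqual y p)) else none := by
  induction l with
  | nil => simp [innerA]
  | cons x rest ih =>
    by_cases hall : (rest.all fun y => areEqual y p || areDisjoint y p) = true
    · simp only [innerA, ih, if_pos hall]
      by_cases he : areEqual x p = true
      · simp [he, List.all_cons, hall]
      · by_cases hd : areDisjoint x p = true
        · simp [he, hd, List.all_cons, hall]
        · simp [he, hd, List.all_cons, hall]
    · simp only [innerA, ih, if_neg hall]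
      simp only [List.all_cons]
      rw [if_neg (by simp_all)]

-- forward-pass reference recursion (proof-side; raw lists as class representatives)
def gstep : List (List Int) → List (List Int) → Option (List (List Int))
  | [], _ => some []
  | x :: xs, seen =>
    if seen.any (fun s => areEqual x s) then gstep xs seen
    else if seen.all (fun s => areDisjoint x s) then
      (gstep xs (x :: seen)).map (fun r => x :: r)
    else none

-- gstep reads 'seen' only through any/all, hence is invariant under reordering it
theorem gstep_congr (m : List (List Int)) : ∀ s₁ s₂ : List (List Int),
    (∀ y, s₁.any (fun s => areEqual y s) = s₂.any (fun s => areEqual y s)) →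
    (∀ y, s₁.all (fun s => areDisjoint y s) = s₂.all (fun s => areDisjoint y s)) →
    gstep m s₁ = gstep m s₂ := by
  induction m with
  | nil => intro _ _ _ _; rfl
  | cons x xs ih =>
    intro s₁ s₂ hany hall
    simp only [gstep, hany x, hall x]
    split
    · exact ih s₁ s₂ hany hall
    · split
      · have := ih (x :: s₁) (x :: s₂)
          (fun y => by simp [List.any_cons, hany y])
          (fun y => by simp [List.all_cons, hall y])
        rw [this]
      · rfl

theorem gstep_swap (m : List (List Int)) (a b : List Int) (s : List (List Int)) :
    gstep m (a :: b :: s) = gstep m (b :: a :: s) := by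
  apply gstep_congr
  · intro y; simp only [List.any_cons]; rw [Bool.or_left_comm]
  · intro y; simp only [List.all_cons]; rw [Bool.and_left_comm]

theorem areEqual_areDisjoint_trans (y x f : List Int) (h1 : areEqual y x = true)
    (h2 : areDisjoint x f = true) : areDisjoint y f = true := by
  rw [areEqual_iff] at h1
  rw [areDisjoint_iff] at h2 ⊢
  intro z hz
  exact h2 z ((h1 z).mp hz)

-- peel off the most recently started class
theorem gstep_cons_seen (f : List Int) : ∀ (m seen : List (List Int)),
    gstep m (f :: seen) =
      if m.all (fun y => areEqual y f || areDisjoint y f || seen.any (fun s => areEqual y s))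
      then gstep (m.filter (fun y => !areEqual y f)) seen else none := by
  intro m
  induction m with
  | nil => intro seen; simp [gstep]
  | cons x xs ih =>
    intro seen
    by_cases hxf : areEqual x f = true
    · have h1 : ((f :: seen).any (fun s => areEqual x s)) = true := by
        simp [List.any_cons, hxf]
      simp only [gstep, h1, if_true]
      rw [ih seen]
      simp [List.all_cons, hxf]
    · by_cases hxs : (seen.any fun s => areEqual x s) = true
      · have h1 : ((f :: seen).any (fun s => areEqual x s)) = true := by
          simp [List.any_cons, hxs]
        simp only [gstep, h1, if_true]
        rw [ih seen]
        have hx : (areEqual x f || areDisjoint x f || seen.any (fun s => areEqual x s)) = true := by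
          simp [hxs]
        simp only [List.all_cons, List.filter_cons, hxf]
        by_cases hc : (xs.all fun y => areEqual y f || areDisjoint y f || seen.any (fun s => areEqual y s)) = true
        · simp [hc, gstep, hxs]
        · simp [hc]
      · by_cases hdf : areDisjoint x f = true
        · by_cases hds : (seen.all fun s => areDisjoint x s) = true
          · have h1 : ((f :: seen).any (fun s => areEqual x s)) = false := by
              simp [List.any_cons, hxf, hxs]
            have h2 : ((f :: seen).all (fun s => areDisjoint x s)) = true := by
              simp [List.all_cons, hdf, hds]
            simp only [gstep, h1, h2, Bool.false_eq_true, if_false, if_true]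
            rw [gstep_swap, ih (x :: seen)]
            have hfun : (fun y => areEqual y f || areDisjoint y f || (x :: seen).any (fun s => areEqual y s))
                      = (fun y => areEqual y f || areDisjoint y f || seen.any (fun s => areEqual y s)) := by
              funext y
              simp only [List.any_cons]
              by_cases hyx : areEqual y x = true
              · simp [hyx, areEqual_areDisjoint_trans y x f hyx hdf]
              · simp [hyx]
            rw [hfun]
            have hx : (areEqual x f || areDisjoint x f || seen.any (fun s => areEqual x s)) = true := by
              simp [hdf]
            simp only [List.all_cons, List.filter_cons, hxf]
            by_cases hc : (xs.all fun y => areEqual y f || areDisjoint y f || seen.any (fun s => areEqual y s)) = true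
            · simp [hc, gstep, hxs, hds, hdf]
            · simp [hc]
          · have h1 : ((f :: seen).any (fun s => areEqual x s)) = false := by
              simp [List.any_cons, hxf, hxs]
            have h2 : ((f :: seen).all (fun s => areDisjoint x s)) = false := by
              simp [List.all_cons, hds]
            simp only [gstep, h1, h2, Bool.false_eq_true, if_false]
            by_cases hc : ((x :: xs).all fun y => areEqual y f || areDisjoint y f || seen.any (fun s => areEqual y s)) = true
            · simp [hc, hxf, gstep, hxs, hds]
            · simp [hc]
        · have h1 : ((f :: seen).any (fun s => areEqual x s)) = false := by
            simp [List.any_cons, hxf, hxs]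
          have h2 : ((f :: seen).all (fun s => areDisjoint x s)) = false := by
            simp [List.all_cons, hdf]
          simp only [gstep, h1, h2, Bool.false_eq_true, if_false]
          have hx : (areEqual x f || areDisjoint x f || seen.any (fun s => areEqual x s)) = false := by
            simp [hxf, hdf, hxs]
          simp [List.all_cons, hx]

-- unfold one outer-loop round at the tail of the list
theorem outerA_concat (ys : List (List Int)) (y : List Int) :
    outerA (ys ++ [y]) =
      match innerA y ys with
      | none => none
      | some l' => (outerA l').map (fun ps => y :: ps) := by
  cases ys with
  | nil => simp [outerA, innerA]
  | cons a ys' =>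
    rw [show a :: ys' ++ [y] = a :: (ys' ++ [y]) from rfl, outerA]
    have hg : (a :: (ys' ++ [y])).getLast (List.cons_ne_nil _ _) = y :=
      List.getLast_concat (l := a :: ys')
    have hd : (a :: (ys' ++ [y])).dropLast = a :: ys' := List.dropLast_concat (l₁ := a :: ys')
    simp only [hg]
    split
    · rename_i h; rw [hg, hd] at h; rw [h]
    · rename_i l' h; rw [hg, hd] at h; rw [h]

theorem outerA_eq_gstep (l : List (List Int)) : outerA l = gstep l.reverse [] := by
  suffices h : ∀ (k : Nat) (l : List (List Int)), l.length ≤ k → outerA l = gstep l.reverse [] from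
    h l.length l le_rfl
  intro k
  induction k with
  | zero =>
    intro l hl
    have : l = [] := List.eq_nil_of_length_eq_zero (Nat.le_zero.mp hl)
    subst this; simp [outerA, gstep]
  | succ k ih =>
    intro l hl
    rcases List.eq_nil_or_concat' l with rfl | ⟨ys, y, rfl⟩
    · simp [outerA, gstep]
    · rw [outerA_concat, List.reverse_append, List.reverse_singleton, List.singleton_append]
      simp only [gstep, List.any_nil, Bool.false_eq_true, if_false, List.all_nil, if_true]
      rw [gstep_cons_seen y ys.reverse []]
      simp only [List.any_nil, Bool.or_false, List.all_reverse]
      rw [innerA_eq]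
      by_cases hall : (ys.all fun z => areEqual z y || areDisjoint z y) = true
      · simp only [hall, if_true]
        have hlen : (ys.filter (fun z => !areEqual z y)).length ≤ k := by
          have h1 := List.length_filter_le (fun z => !areEqual z y) ys
          have h2 : ys.length + 1 ≤ k + 1 := by simpa using hl
          omega
        rw [ih _ hlen, List.filter_reverse]
      · simp [hall]

-- the B pass equals gstep, given that covered is the union of the seen classes
theorem goB_eq_gstep : ∀ (m : List (List Int)) (seenB : List (PySem.Set Int))
    (seenG : List (List Int)) (covered : PySem.Set Int) (parts : List (List Int)),
    List.Forall₂ (fun s t => ∀ z : Int, z ∈ s ↔ z ∈ t) seenB seenG →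
    (∀ z : Int, z ∈ covered ↔ ∃ s ∈ seenG, z ∈ s) →
    goB m seenB covered parts =
      (match gstep m seenG with | some r => parts ++ r | none => []) := by
  intro m
  induction m with
  | nil => intro seenB seenG covered parts _ _; simp [goB, gstep]
  | cons x xs ih =>
    intro seenB seenG covered parts hf hcov
    have hany : (seenB.any fun s => PySem.Set.equal s (PySem.Set.ofList x))
        = (seenG.any fun t => areEqual x t) := by
      clear hcov ih
      induction hf with
      | nil => rfl
      | cons hab _ ihp =>
        simp only [List.any_cons, ihp]
        congr 1
        apply Bool.coe_iff_coe.mp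
        rw [PySem.Set.equal_iff, areEqual_iff]
        constructor
        · intro h z; rw [← (hab z), h z, PySem.Set.mem_ofList]
        · intro h z; rw [hab z, ← (h z), PySem.Set.mem_ofList]
    have hdisj : (PySem.Set.isdisjoint (PySem.Set.ofList x) covered)
        = (seenG.all fun t => areDisjoint x t) := by
      apply Bool.coe_iff_coe.mp
      rw [PySem.Set.isdisjoint_iff]
      simp only [List.all_eq_true, areDisjoint_iff, PySem.Set.mem_ofList]
      constructor
      · intro h t ht z hz hzt
        exact h z hz ((hcov z).mpr ⟨t, ht, hzt⟩)
      · intro h z hz hzc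
        obtain ⟨t, ht, hzt⟩ := (hcov z).mp hzc
        exact h t ht z hz hzt
    simp only [goB, gstep, hany, hdisj]
    by_cases ha : (seenG.any fun t => areEqual x t) = true
    · simp only [ha, if_true]
      exact ih seenB seenG covered parts hf hcov
    · simp only [ha, Bool.false_eq_true, if_false]
      by_cases hd : (seenG.all fun t => areDisjoint x t) = true
      · simp only [hd, if_true, Bool.not_true, Bool.false_eq_true, if_false]
        have hf' : List.Forall₂ (fun s t => ∀ z : Int, z ∈ s ↔ z ∈ t)
            (PySem.Set.ofList x :: seenB) (x :: seenG) :=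
          List.Forall₂.cons (fun z => by simp [PySem.Set.mem_ofList]) hf
        have hcov' : ∀ z : Int, z ∈ PySem.Set.union covered (PySem.Set.ofList x) ↔
            ∃ s ∈ (x :: seenG), z ∈ s := by
          intro z
          rw [PySem.Set.mem_union, hcov z]
          simp [PySem.Set.mem_ofList]
          exact Or.comm
        rw [ih _ _ _ _ hf' hcov']
        cases gstep xs (x :: seenG) with
        | none => rfl
        | some r => simp
      · simp [hd]

-- ===== VERDICT (by name: the statement is the Claim_ definition above) =====
theorem get_eqclasses_spec : Claim_equal_get_eqclasses := by
  intro n E _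
  unfold Spec_get_eqclasses get_eqclasses get_eqclasses_alt
  have hL : buildB n E = getClassesA n E := by
    unfold buildB getClassesA
    simp only [List.foldl_append, List.foldl_map]
  rw [hL]
  rw [goB_eq_gstep (getClassesA n E).reverse [] [] [] [] List.Forall₂.nil (by simp)]
  rw [← outerA_eq_gstep]
  cases outerA (getClassesA n E) <;> simp
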